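-- pv_equiv track=rewrite | github.com/martyr37/reconfigurable-solar-cells | solar_module.py | make_partition_list
-- ===== SOURCE A (Python) =====
-- def make_partition_list(block_strings):
--     partition_list = []
--     for block in block_strings:
--         partition = []
--         read_state = False
--         cell = ''
--         for char in block:
--             if char.isdigit() is True and read_state is False:
--                 read_state = True
--                 cell += char
--             elif char.isdigit() is True and read_state is True:
--                 read_state = False
--                 cell += char
--                 partition.append(cell)
--                 cell = ''
--         partition.sort()
--         partition_list.append(partition)
--     return partition_list
-- ===== SOURCE B (Python) =====
-- def make_partition_list(block_strings):
--     def pair_up(ds):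
--         if len(ds) < 2:
--             return []
--         return [ds[0] + ds[1]] + pair_up(ds[2:])
--     return [sorted(pair_up([c for c in block if c.isdigit()]))
--             for block in block_strings]
-- ===== Notes on version B (the rewrite author's own statement) =====
-- stated objective: simpler
-- what changed: Replaced A's single-pass read_state toggle state machine with a two-stage decomposition: filter the digit characters of each block, then pair them up two at a time recursively and sort.
import Mathlib
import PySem

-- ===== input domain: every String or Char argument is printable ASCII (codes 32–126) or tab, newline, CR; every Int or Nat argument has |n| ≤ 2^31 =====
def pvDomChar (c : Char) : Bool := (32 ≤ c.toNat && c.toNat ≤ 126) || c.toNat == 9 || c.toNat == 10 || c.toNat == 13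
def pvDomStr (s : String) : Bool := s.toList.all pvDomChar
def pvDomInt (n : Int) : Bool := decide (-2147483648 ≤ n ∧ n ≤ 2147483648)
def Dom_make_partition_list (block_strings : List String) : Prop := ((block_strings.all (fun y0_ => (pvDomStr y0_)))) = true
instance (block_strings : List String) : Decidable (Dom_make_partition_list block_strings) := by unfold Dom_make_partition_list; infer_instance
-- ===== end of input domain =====

-- B pairs the filtered digit list in two stages instead of A's read_state toggle state machine; objective: simpler.

-- ===== PORT A =====
-- A's inner loop state: (partition, read_state, cell); cell is kept as List Char
-- (Python string concatenation 'cell += char' = appending the char; exact on ASCII).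
def pvStepA (s : List String × Bool × List Char) (char : Char) : List String × Bool × List Char :=
  if PySem.Chars.isdigit char && !s.2.1 then
    (s.1, true, s.2.2 ++ [char])
  else if PySem.Chars.isdigit char && s.2.1 then
    (s.1 ++ [String.ofList (s.2.2 ++ [char])], false, [])
  else s

def make_partition_list (block_strings : List String) : List (List String) :=
  block_strings.foldl (fun partition_list block =>
    let st := block.toList.foldl pvStepA ([], false, [])
    partition_list ++ [PySem.List.sorted st.1 (fun x => x) false]) []

-- ===== PORT B =====
-- pair_up from Source B: first two digits make a cell, recurse on the rest.
def pvPairUp : List Char → List String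
  | a :: b :: rest => String.ofList [a, b] :: pvPairUp rest
  | _ => []

def make_partition_list_alt (block_strings : List String) : List (List String) :=
  block_strings.map (fun block =>
    PySem.List.sorted (pvPairUp (block.toList.filter (fun c => PySem.Chars.isdigit c)))
      (fun x => x) false)

-- ===== PRECONDITION & SPEC =====
def Spec_make_partition_list (block_strings : List String) (out : List (List String)) : Prop := out = make_partition_list_alt block_strings
instance (block_strings : List String) (out : List (List String)) : Decidable (Spec_make_partition_list block_strings out) := by unfold Spec_make_partition_list; infer_instance

-- ===== CLAIM (what is proved, stated in full; the proofs are below) =====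
def Claim_equal_make_partition_list : Prop := ∀ (block_strings : List String), Dom_make_partition_list block_strings → Spec_make_partition_list block_strings (make_partition_list block_strings)

-- ===== LEMMAS AND PROOFS =====

/-- A's state machine equals pair-up of the filtered digits, for both toggle states. -/
lemma pvStepA_loop (cs : List Char) : ∀ (acc : List String),
    ((cs.foldl pvStepA (acc, false, [])).1 = acc ++ pvPairUp (cs.filter (fun c => PySem.Chars.isdigit c)))
    ∧ ∀ d, (cs.foldl pvStepA (acc, true, [d])).1
        = acc ++ pvPairUp (d :: cs.filter (fun c => PySem.Chars.isdigit c)) := by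
  induction cs with
  | nil => intro acc; simp [pvPairUp]
  | cons c rest ih =>
    intro acc
    by_cases hd : PySem.Chars.isdigit c
    · constructor
      · simp only [List.foldl_cons, pvStepA, hd, List.filter_cons, if_pos, Bool.true_and,
          Bool.not_false]
        exact (ih acc).2 c
      · intro d
        simp only [List.foldl_cons, pvStepA, hd, List.filter_cons, if_pos, Bool.true_and,
          Bool.not_true]
        have := (ih (acc ++ [String.ofList [d, c]])).1
        simpa [pvPairUp] using this
    · have hd' : PySem.Chars.isdigit c = false := by simpa using hd
      constructor
      · simpa [pvStepA, hd', List.filter_cons] using (ih acc).1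
      · intro d
        simpa [pvStepA, hd', List.filter_cons] using (ih acc).2 d

/-- outer foldl-append equals map, with a general accumulator. -/
lemma pv_outer (bs : List String) : ∀ (acc : List (List String)),
    bs.foldl (fun partition_list block =>
      let st := block.toList.foldl pvStepA ([], false, [])
      partition_list ++ [PySem.List.sorted st.1 (fun x => x) false]) acc
    = acc ++ bs.map (fun block =>
        PySem.List.sorted (pvPairUp (block.toList.filter (fun c => PySem.Chars.isdigit c)))
          (fun x => x) false) := by
  induction bs with
  | nil => intro acc; simp
  | cons b rest ih =>
    intro acc
    simp only [List.foldl_cons, List.map_cons, ih, (pvStepA_loop b.toList []).1]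
    simp

-- ===== VERDICT (by name: the statement is the Claim_ definition above) =====
theorem make_partition_list_spec : Claim_equal_make_partition_list := by
  intro bs _
  show make_partition_list bs = make_partition_list_alt bs
  simpa [make_partition_list, make_partition_list_alt] using pv_outer bs []
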